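-- pv_equiv track=rewrite | github.com/AndreKev/Code-challenge | Defi_turings/Turing60.py | delete7
-- ===== SOURCE A (Python) =====
-- def delete7(index, notre_list):
--     if len(notre_list) >= 7:
--         i = index + 6
--         while i < len(notre_list):
--             del notre_list[i]
--             i += 6
--         i -= 6
--     else:
--         i = 7%len(notre_list)-1
--         del notre_list[i]
--     return i
-- ===== SOURCE B (Python) =====
-- def delete7(index, notre_list):
--     # Closed form: the loop in A deletes one element and adds 6 to i per
--     # iteration, so it runs k = max(0, ceil((n - s) / 7)) times where
--     # s = index + 6 and n = len(notre_list); final result is s + 6*k - 6.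
--     # In-place mutation reproduced via one extended-slice delete when s >= 0
--     # (for negative s only the return value is matched; A wraps around).
--     n = len(notre_list)
--     if n >= 7:
--         s = index + 6
--         k = max(0, (n - s + 6) // 7)
--         if s >= 0:
--             del notre_list[s::7]
--         return s + 6 * k - 6
--     i = 7 % n - 1
--     del notre_list[i]
--     return i
-- ===== Notes on version B (the rewrite author's own statement) =====
-- stated objective: faster
-- what changed: Replaces A's while-loop of repeated in-place single-element deletions with a closed-form count of loop iterations (k = max(0, ceil((n-index-6)/7))) and one extended-slice delete, computing the returned index arithmetically.
import Mathlib
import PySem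

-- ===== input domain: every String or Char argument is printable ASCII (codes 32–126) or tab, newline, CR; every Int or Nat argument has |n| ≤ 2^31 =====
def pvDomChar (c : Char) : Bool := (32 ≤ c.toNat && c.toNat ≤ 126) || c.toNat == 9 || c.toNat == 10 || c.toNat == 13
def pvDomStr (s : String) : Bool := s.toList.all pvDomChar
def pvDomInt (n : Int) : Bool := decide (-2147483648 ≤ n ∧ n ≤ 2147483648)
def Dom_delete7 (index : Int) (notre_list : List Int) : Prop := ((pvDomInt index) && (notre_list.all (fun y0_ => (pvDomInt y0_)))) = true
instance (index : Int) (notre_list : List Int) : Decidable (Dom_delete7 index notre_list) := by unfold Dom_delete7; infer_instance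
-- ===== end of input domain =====

-- B replaces A's repeated-deletion while-loop by a closed-form iteration count (faster).
-- A mutates notre_list in place; the equivalence proved here is about the RETURN value only
-- (Python B reproduces the mutation for index + 6 ≥ 0).

-- ===== PORT A =====
-- the while loop: state is (i, current list); each iteration deletes notre_list[i] and adds 6.
-- On IndexError (pop? = none) Python raises; such inputs are outside Pre_, we return i there.
def delete7Loop (i : Int) (l : List Int) : Int :=
  if i < (l.length : Int) then
    match h : PySem.List.pop? l i with
    | some r =>
        have : r.2.length < l.length := by
          have := PySem.List.length_of_pop?_eq_some l h; omega
        delete7Loop (i + 6) r.2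
    | none => i
  else i
termination_by l.length

def delete7 (index : Int) (notre_list : List Int) : Int :=
  if (notre_list.length : Int) ≥ 7 then
    delete7Loop (index + 6) notre_list - 6
  else
    PySem.Int.mod 7 (notre_list.length : Int) - 1

-- ===== PORT B =====
def delete7_alt (index : Int) (notre_list : List Int) : Int :=
  let n : Int := notre_list.length
  if n ≥ 7 then
    let s := index + 6
    let k := max 0 (PySem.Int.floordiv (n - s + 6) 7)
    s + 6 * k - 6
  else
    PySem.Int.mod 7 n - 1

-- ===== PRECONDITION & SPEC =====
-- Pre_ excludes exactly the inputs on which A raises: the empty list (ZeroDivisionError from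
-- 7 % len) and, when len ≥ 7, an index with index + 6 < -len (IndexError in the del).
def Pre_delete7 (index : Int) (notre_list : List Int) : Prop :=
  notre_list ≠ [] ∧ (7 ≤ notre_list.length → -(notre_list.length : Int) ≤ index + 6)
instance (index : Int) (notre_list : List Int) : Decidable (Pre_delete7 index notre_list) := by
  unfold Pre_delete7; infer_instance

def pvWitness_delete7 : Int × List Int := (0, [1, 2, 3, 4, 5, 6, 7])

def Spec_delete7 (index : Int) (notre_list : List Int) (out : Int) : Prop := out = delete7_alt index notre_list
instance (index : Int) (notre_list : List Int) (out : Int) : Decidable (Spec_delete7 index notre_list out) := by unfold Spec_delete7; infer_instance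

-- ===== CLAIM (what is proved, stated in full; the proofs are below) =====
def Claim_equal_delete7 : Prop := ∀ (index : Int) (notre_list : List Int), Dom_delete7 index notre_list → Pre_delete7 index notre_list → Spec_delete7 index notre_list (delete7 index notre_list)

-- ===== LEMMAS AND PROOFS =====

theorem fdiv7 (x : Int) : x.fdiv 7 = x / 7 := by
  simp [Int.fdiv_eq_ediv]

theorem pop?_in_range (l : List Int) (i : Int) (hlo : -(l.length : Int) ≤ i)
    (hhi : i < (l.length : Int)) : ∃ r : Int × List Int, PySem.List.pop? l i = some r := by
  unfold PySem.List.pop? PySem.List.pyIdx?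
  by_cases h0 : 0 ≤ i
  · rw [if_pos h0, if_pos hhi]
    have hk : i.toNat < l.length := by omega
    simp [List.getElem?_eq_getElem hk]
  · rw [if_neg h0, if_pos hlo]
    have hk : l.length - (-i).toNat < l.length := by omega
    simp [List.getElem?_eq_getElem hk]

theorem delete7Loop_closed :
    ∀ (n : Nat) (l : List Int) (i : Int), l.length = n → -(l.length : Int) ≤ i →
    delete7Loop i l = i + 6 * max 0 (((l.length : Int) - i + 6).fdiv 7) := by
  intro n
  induction n using Nat.strong_induction_on with
  | _ n ih =>
    intro l i hn hlo
    rw [delete7Loop]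
    by_cases hi : i < (l.length : Int)
    · simp only [if_pos hi]
      obtain ⟨r0, hr0⟩ := pop?_in_range l i hlo hi
      split
      case h_2 h => rw [hr0] at h; exact absurd h (by simp)
      case h_1 r hr =>
        have hlen := PySem.List.length_of_pop?_eq_some l hr
        have hlo' : -(r.2.length : Int) ≤ i + 6 := by omega
        rw [ih r.2.length (by omega) r.2 (i + 6) rfl hlo']
        have hn1 : (r.2.length : Int) = (l.length : Int) - 1 := by omega
        rw [hn1, fdiv7, fdiv7]
        omega
    · simp only [if_neg hi]
      rw [fdiv7]
      omega

-- ===== VERDICT (by name: the statement is the Claim_ definition above) =====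
theorem delete7_spec : Claim_equal_delete7 := by
  intro index notre_list _hdom hpre
  unfold Spec_delete7 delete7 delete7_alt
  rcases hpre with ⟨hne, hidx⟩
  by_cases h7 : (notre_list.length : Int) ≥ 7
  · have h7' : 7 ≤ notre_list.length := by exact_mod_cast h7
    rw [if_pos h7]
    simp only [h7, if_pos, PySem.Int.floordiv]
    rw [delete7Loop_closed notre_list.length notre_list (index + 6) rfl
        (by have := hidx h7'; omega)]
  · rw [if_neg h7]
    simp only [h7, if_false]
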